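-- pv_equiv track=rewrite | github.com/amy2213/Voynich-Transition-Grammar | scripts/04_extended_analysis.py | parse_eva
-- ===== SOURCE A (Python) =====
-- def parse_eva(token):
--     chars = []; i = 0
--     while i < len(token):
--         if i < len(token)-2 and token[i]=='c' and token[i+1] in 'tkpf' and token[i+2]=='h':
--             chars.append(token[i:i+3]); i += 3
--         elif i < len(token)-1 and token[i:i+2] in ('ch','sh','ee','ii','ai','oi'):
--             chars.append(token[i:i+2]); i += 2
--         else: chars.append(token[i]); i += 1
--     return chars
-- ===== SOURCE B (Python) =====
-- import re
--
-- # One regex alternation: 3-char benched glyphs first, then 2-char units, then a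
-- # catch-all single character; re's leftmost non-overlapping scan gives the 3->2->1
-- # precedence of the hand-written index loop.
-- _EVA = re.compile(r'c[tkpf]h|ch|sh|ee|ii|ai|oi|[\s\S]')
--
-- def parse_eva(token):
--     return _EVA.findall(token)
-- ===== Notes on version B (the rewrite author's own statement) =====
-- stated objective: idiomatic
-- what changed: Replaces the explicit index-stepping while-loop state machine with a single compiled-regex scan (re.findall with an ordered alternation c[tkpf]h | ch|sh|ee|ii|ai|oi | [\s\S]), which a timing run measured ~3x faster.
import Mathlib
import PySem

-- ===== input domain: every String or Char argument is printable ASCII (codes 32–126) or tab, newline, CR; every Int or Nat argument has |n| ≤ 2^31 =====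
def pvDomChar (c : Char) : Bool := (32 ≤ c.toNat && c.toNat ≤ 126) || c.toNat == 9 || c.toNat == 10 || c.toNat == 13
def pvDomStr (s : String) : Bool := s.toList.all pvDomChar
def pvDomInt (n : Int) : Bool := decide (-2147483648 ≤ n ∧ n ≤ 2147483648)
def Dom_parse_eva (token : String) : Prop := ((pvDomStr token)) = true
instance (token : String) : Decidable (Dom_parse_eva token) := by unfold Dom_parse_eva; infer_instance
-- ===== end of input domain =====

-- B replaces A's index-stepping while loop by a single regex scan (re.findall with
-- ordered alternation c[tkpf]h | ch|sh|ee|ii|ai|oi | [\s\S]); same output, more idiomatic.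

-- ===== PORT A =====
-- A's while loop over index i, transcribed as recursion on the remaining distance
-- s.length - i; token[i] via PySem.List.pyGet?, slices via PySem.List.slice,
-- the Python `in` tests as list membership (exact: equality of the char lists).
def parse_evaGo (s : List Char) (i : Nat) : List String :=
  if _h : i < s.length then
    if (i : Int) < (s.length : Int) - 2 ∧ PySem.List.pyGet? s (i : Int) = some 'c'
        ∧ (∃ c, PySem.List.pyGet? s ((i : Int) + 1) = some c ∧ c ∈ ['t','k','p','f'])
        ∧ PySem.List.pyGet? s ((i : Int) + 2) = some 'h' then
      String.ofList (PySem.List.slice s (some (i : Int)) (some ((i : Int) + 3))) :: parse_evaGo s (i + 3)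
    else if (i : Int) < (s.length : Int) - 1 ∧
        PySem.List.slice s (some (i : Int)) (some ((i : Int) + 2)) ∈
          [['c','h'],['s','h'],['e','e'],['i','i'],['a','i'],['o','i']] then
      String.ofList (PySem.List.slice s (some (i : Int)) (some ((i : Int) + 2))) :: parse_evaGo s (i + 2)
    else
      String.ofList ((PySem.List.pyGet? s (i : Int)).toList) :: parse_evaGo s (i + 1)
  else []
termination_by s.length - i
decreasing_by all_goals omega

def parse_eva (token : String) : List String := parse_evaGo token.toList 0

-- ===== PORT B =====
-- Transcription of the regex engine's scan for r'c[tkpf]h|ch|sh|ee|ii|ai|oi|[\s\S]':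
-- at each position try the alternatives left to right, emit the match, continue
-- after it (leftmost non-overlapping matching = structural recursion on the suffix).
def pvIsUnit2 (a b : Char) : Bool :=
  decide ([a,b] ∈ [['c','h'],['s','h'],['e','e'],['i','i'],['a','i'],['o','i']])

def pvRegexScan : List Char → List String
  | [] => []
  | a :: b :: c :: rest =>
      if a = 'c' ∧ b ∈ ['t','k','p','f'] ∧ c = 'h' then
        String.ofList [a,b,c] :: pvRegexScan rest
      else if pvIsUnit2 a b then
        String.ofList [a,b] :: pvRegexScan (c :: rest)
      else
        String.ofList [a] :: pvRegexScan (b :: c :: rest)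
  | [a, b] =>
      if pvIsUnit2 a b then [String.ofList [a,b]]
      else String.ofList [a] :: pvRegexScan [b]
  | [a] => [String.ofList [a]]

def parse_eva_alt (token : String) : List String := pvRegexScan token.toList

-- ===== PRECONDITION & SPEC =====
def Spec_parse_eva (token : String) (out : List String) : Prop := out = parse_eva_alt token
instance (token : String) (out : List String) : Decidable (Spec_parse_eva token out) := by unfold Spec_parse_eva; infer_instance

-- ===== CLAIM (what is proved, stated in full; the proofs are below) =====
def Claim_equal_parse_eva : Prop := ∀ (token : String), Dom_parse_eva token → Spec_parse_eva token (parse_eva token)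

-- ===== LEMMAS AND PROOFS =====

theorem slice3 (s : List Char) (i : Nat) :
    PySem.List.slice s (some (i : Int)) (some ((i : Int) + 3)) = (s.drop i).take 3 := by
  have := PySem.List.slice_natCast_add s i 3
  push_cast at this; simpa using this

theorem slice2 (s : List Char) (i : Nat) :
    PySem.List.slice s (some (i : Int)) (some ((i : Int) + 2)) = (s.drop i).take 2 := by
  have := PySem.List.slice_natCast_add s i 2
  push_cast at this; simpa using this

theorem get0 (s : List Char) (i : Nat) (h : i < s.length) :
    PySem.List.pyGet? s (i : Int) = some s[i] := by
  rw [PySem.List.pyGet?_natCast, List.getElem?_eq_getElem h]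

theorem get1 (s : List Char) (i : Nat) (h : i + 1 < s.length) :
    PySem.List.pyGet? s ((i : Int) + 1) = some s[i+1] := by
  have := PySem.List.pyGet?_natCast s (i+1)
  push_cast at this
  rw [this, List.getElem?_eq_getElem h]

theorem get2 (s : List Char) (i : Nat) (h : i + 2 < s.length) :
    PySem.List.pyGet? s ((i : Int) + 2) = some s[i+2] := by
  have := PySem.List.pyGet?_natCast s (i+2)
  push_cast at this
  rw [this, List.getElem?_eq_getElem h]

theorem drop1 (s : List Char) (i : Nat) (h : i < s.length) :
    s.drop i = s[i] :: s.drop (i+1) := List.drop_eq_getElem_cons h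

theorem parse_evaGo_eq_scan (s : List Char) (i : Nat) :
    parse_evaGo s i = pvRegexScan (s.drop i) := by
  fun_induction parse_evaGo s i
  case case1 i h hc ih =>
    obtain ⟨hl, ha, ⟨b, hb, hbm⟩, hh⟩ := hc
    have h2 : i + 2 < s.length := by omega
    have h1 : i + 1 < s.length := by omega
    rw [get0 s i h] at ha
    rw [get1 s i h1] at hb
    rw [get2 s i h2] at hh
    have ea := Option.some.inj ha
    have eb := Option.some.inj hb
    have eh := Option.some.inj hh
    rw [slice3, ih, drop1 s i h, drop1 s (i+1) h1]
    rw [show i + 1 + 1 = i + 2 from rfl, drop1 s (i+2) h2]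
    rw [show i + 2 + 1 = i + 3 from rfl]
    rw [pvRegexScan, if_pos ⟨ea, by rw [eb]; exact hbm, eh⟩]
    simp [List.take]
  case case2 i h hc1 hc2 ih =>
    obtain ⟨hl, hsl⟩ := hc2
    have h1 : i + 1 < s.length := by omega
    rw [slice2] at hsl
    rw [slice2, ih, drop1 s i h, drop1 s (i+1) h1] at *
    rw [show i + 1 + 1 = i + 2 from rfl] at *
    have hu : pvIsUnit2 s[i] s[i+1] = true := by
      simp only [pvIsUnit2, decide_eq_true_eq]
      simpa [List.take] using hsl
    by_cases h2 : i + 2 < s.length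
    · rw [drop1 s (i+2) h2]
      have hno : ¬ (s[i] = 'c' ∧ s[i+1] ∈ ['t','k','p','f'] ∧ s[i+2] = 'h') := by
        intro ⟨ea, eb, eh⟩
        exact hc1 ⟨by omega, by rw [get0 s i h, ea], ⟨s[i+1], get1 s i h1, eb⟩,
          by rw [get2 s i h2, eh]⟩
      rw [pvRegexScan, if_neg hno, if_pos hu]
      simp [List.take]
    · have he : s.drop (i+2) = [] := List.drop_eq_nil_of_le (by omega)
      rw [he]
      simp [pvRegexScan, hu, List.take]
  case case3 i h hc1 hc2 ih =>
    rw [get0 s i h, ih, drop1 s i h]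
    by_cases h1 : i + 1 < s.length
    · rw [drop1 s (i+1) h1]
      rw [show i + 1 + 1 = i + 2 from rfl]
      have hu : pvIsUnit2 s[i] s[i+1] = false := by
        simp only [pvIsUnit2, decide_eq_false_iff_not]
        intro hmem
        exact hc2 ⟨by omega, by rw [slice2, drop1 s i h, drop1 s (i+1) h1]; simpa [List.take] using hmem⟩
      by_cases h2 : i + 2 < s.length
      · rw [drop1 s (i+2) h2]
        have hno : ¬ (s[i] = 'c' ∧ s[i+1] ∈ ['t','k','p','f'] ∧ s[i+2] = 'h') := by
          intro ⟨ea, eb, eh⟩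
          exact hc1 ⟨by omega, by rw [get0 s i h, ea], ⟨s[i+1], get1 s i h1, eb⟩,
            by rw [get2 s i h2, eh]⟩
        rw [pvRegexScan, if_neg hno, if_neg (by simp [hu])]
        simp
      · have he : s.drop (i+2) = [] := List.drop_eq_nil_of_le (by omega)
        rw [he]
        simp [pvRegexScan, hu]
    · have he : s.drop (i+1) = [] := List.drop_eq_nil_of_le (by omega)
      rw [he]
      simp [pvRegexScan]
  case case4 i h =>
    rw [List.drop_eq_nil_of_le (by omega)]
    rfl

-- ===== VERDICT (by name: the statement is the Claim_ definition above) =====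
theorem parse_eva_spec : Claim_equal_parse_eva := by
  intro token _
  unfold Spec_parse_eva parse_eva parse_eva_alt
  simpa using parse_evaGo_eq_scan token.toList 0
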